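-- pv_equiv track=rewrite | github.com/Romario27/Intro-Taller-de-Programacion | Introduccion/Examenes/quiz 25-4-2018.py | mayores_aux
-- ===== SOURCE A (Python) =====
-- def mayores_aux(num,lista,indice,contador):
--     if indice==len(lista):
--         return contador
--     else:
--         if lista[indice]>num:
--             return mayores_aux(num,lista,indice+1,contador+1)
--         else:
--             return mayores_aux(num,lista,indice+1,contador)
-- ===== SOURCE B (Python) =====
-- def mayores_aux(num, lista, indice, contador):
--     total = contador
--     for i in range(indice, len(lista)):
--         if lista[i] > num:
--             total += 1
--     return total
-- ===== Notes on version B (the rewrite author's own statement) =====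
-- stated objective: idiomatic
-- what changed: Replaced the tail recursion (one Python call frame per element) with an iterative for-loop over range(indice, len(lista)) accumulating the count.
-- crash fix: For indice > len(lista), A recurses past the end and raises IndexError while B's empty range returns contador unchanged. — e.g. on mayores_aux(0, [], 1, 5): A raises IndexError, B returns 5
import Mathlib
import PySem

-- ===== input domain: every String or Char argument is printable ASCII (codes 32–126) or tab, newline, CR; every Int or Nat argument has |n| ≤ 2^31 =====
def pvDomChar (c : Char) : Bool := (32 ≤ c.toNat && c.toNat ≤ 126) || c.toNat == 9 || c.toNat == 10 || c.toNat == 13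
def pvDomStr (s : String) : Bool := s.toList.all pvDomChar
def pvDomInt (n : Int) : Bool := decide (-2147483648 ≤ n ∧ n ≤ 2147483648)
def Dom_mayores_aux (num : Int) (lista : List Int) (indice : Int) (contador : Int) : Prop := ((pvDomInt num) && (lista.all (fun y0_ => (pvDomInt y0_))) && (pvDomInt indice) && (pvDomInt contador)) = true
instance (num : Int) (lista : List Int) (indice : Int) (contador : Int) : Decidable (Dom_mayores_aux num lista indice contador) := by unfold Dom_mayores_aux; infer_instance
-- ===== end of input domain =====

-- B replaces A's tail recursion by an iterative for-loop over range(indice, len(lista)).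

-- ===== PORT A =====
-- Literal port of A's recursion; lista[indice] via pyGet? (none = IndexError, outside Pre_).
def mayores_aux (num : Int) (lista : List Int) (indice : Int) (contador : Int) : Int :=
  if indice = (lista.length : Int) then contador
  else
    match h : PySem.List.pyGet? lista indice with
    | none => contador   -- Python raises IndexError here; excluded by Pre_
    | some x =>
      if x > num then mayores_aux num lista (indice + 1) (contador + 1)
      else mayores_aux num lista (indice + 1) contador
termination_by ((lista.length : Int) - indice).toNat
decreasing_by
  all_goals
    have hin : PySem.Raise.InRange lista.length indice := by
      by_contra hc
      rw [(PySem.List.pyGet?_eq_none_iff lista indice).mpr hc] at h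
      simp at h
    simp only [PySem.Raise.InRange] at hin
    omega

-- ===== PORT B =====
-- Port of B: fold of the loop body over range(indice, len(lista)); lista[i] via pyGet?.
def mayores_aux_alt (num : Int) (lista : List Int) (indice : Int) (contador : Int) : Int :=
  (PySem.List.pyRange indice (lista.length : Int) 1).foldl
    (fun total i =>
      match PySem.List.pyGet? lista i with
      | none => total   -- Python raises IndexError here; excluded by Pre_
      | some x => if x > num then total + 1 else total)
    contador

-- ===== PRECONDITION & SPEC =====
-- A raises IndexError when indice > len(lista) (recursion past the end) or indice < -len(lista);
-- Pre_ admits exactly the indices on which A returns.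
def Pre_mayores_aux (num : Int) (lista : List Int) (indice : Int) (contador : Int) : Prop :=
  -(lista.length : Int) ≤ indice ∧ indice ≤ (lista.length : Int)
instance (num : Int) (lista : List Int) (indice : Int) (contador : Int) : Decidable (Pre_mayores_aux num lista indice contador) := by unfold Pre_mayores_aux; infer_instance

def pvWitness_mayores_aux : Int × List Int × Int × Int := (3, [1, 5, 4], 0, 0)

-- For indice > len(lista), A recurses past the end and raises IndexError while B's empty range returns contador unchanged.
def Raises_mayores_aux (num : Int) (lista : List Int) (indice : Int) (contador : Int) : Prop :=
  (lista.length : Int) < indice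
instance (num : Int) (lista : List Int) (indice : Int) (contador : Int) : Decidable (Raises_mayores_aux num lista indice contador) := by unfold Raises_mayores_aux; infer_instance
def pvRaiseWitness_mayores_aux : Int × List Int × Int × Int := (0, [], 1, 5)
def pvRaiseWitnessOut_mayores_aux : Int := 5

def Spec_mayores_aux (num : Int) (lista : List Int) (indice : Int) (contador : Int) (out : Int) : Prop := out = mayores_aux_alt num lista indice contador
instance (num : Int) (lista : List Int) (indice : Int) (contador : Int) (out : Int) : Decidable (Spec_mayores_aux num lista indice contador out) := by unfold Spec_mayores_aux; infer_instance

-- ===== CLAIM (what is proved, stated in full; the proofs are below) =====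
def Claim_equal_mayores_aux : Prop := ∀ (num : Int) (lista : List Int) (indice : Int) (contador : Int), Dom_mayores_aux num lista indice contador → Pre_mayores_aux num lista indice contador → Spec_mayores_aux num lista indice contador (mayores_aux num lista indice contador)
def Claim_raises_mayores_aux : Prop := (∀ (num : Int) (lista : List Int) (indice : Int) (contador : Int), Dom_mayores_aux num lista indice contador → Raises_mayores_aux num lista indice contador → ¬ Pre_mayores_aux num lista indice contador) ∧ (Dom_mayores_aux (pvRaiseWitness_mayores_aux.1) (pvRaiseWitness_mayores_aux.2.1) (pvRaiseWitness_mayores_aux.2.2.1) (pvRaiseWitness_mayores_aux.2.2.2) ∧ Raises_mayores_aux (pvRaiseWitness_mayores_aux.1) (pvRaiseWitness_mayores_aux.2.1) (pvRaiseWitness_mayores_aux.2.2.1) (pvRaiseWitness_mayores_aux.2.2.2) ∧ mayores_aux_alt (pvRaiseWitness_mayores_aux.1) (pvRaiseWitness_mayores_aux.2.1) (pvRaiseWitness_mayores_aux.2.2.1) (pvRaiseWitness_mayores_aux.2.2.2) = pvRaiseWitnessOut_mayores_aux)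

-- ===== LEMMAS AND PROOFS =====

theorem mayores_aux_eq_alt (num : Int) (lista : List Int) :
    ∀ (fuel : Nat) (indice contador : Int),
      ((lista.length : Int) - indice).toNat ≤ fuel →
      -(lista.length : Int) ≤ indice → indice ≤ (lista.length : Int) →
      mayores_aux num lista indice contador = mayores_aux_alt num lista indice contador := by
  intro fuel
  induction fuel with
  | zero =>
    intro indice contador hf h1 h2
    have he : indice = (lista.length : Int) := by omega
    rw [mayores_aux, mayores_aux_alt, if_pos he, he,
      PySem.List.pyRange_one_eq_nil (by omega)]
    rfl
  | succ n ih =>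
    intro indice contador hf h1 h2
    rcases eq_or_lt_of_le h2 with he | hlt
    · rw [mayores_aux, mayores_aux_alt, if_pos he, he,
        PySem.List.pyRange_one_eq_nil (by omega)]
      rfl
    · rw [mayores_aux, if_neg (by omega), mayores_aux_alt,
        PySem.List.pyRange_one_cons hlt, List.foldl_cons]
      split
      · rename_i hnone
        exact absurd ((PySem.List.pyGet?_eq_none_iff lista indice).mp hnone)
          (by simp [PySem.Raise.InRange]; omega)
      · rename_i x hx
        by_cases hc : x > num
        · simp only [hx, if_pos hc]
          rw [ih (indice + 1) (contador + 1) (by omega) (by omega) (by omega)]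
          rfl
        · simp only [hx, if_neg hc]
          rw [ih (indice + 1) contador (by omega) (by omega) (by omega)]
          rfl

-- ===== VERDICT (by name: the statement is the Claim_ definition above) =====
theorem mayores_aux_spec : Claim_equal_mayores_aux := by
  intro num lista indice contador _ hpre
  exact mayores_aux_eq_alt num lista (((lista.length : Int) - indice).toNat) indice contador
    le_rfl hpre.1 hpre.2

@[simp] theorem mayores_aux_raises : Claim_raises_mayores_aux := by
  unfold Claim_raises_mayores_aux
  refine ⟨?_, by decide⟩
  intro num lista indice contador _ hr hpre
  exact absurd hpre.2 (by exact not_le.mpr hr)
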